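-- pv_equiv track=rewrite | github.com/ESSS/barril | src/barril/units/unit_database.py | FixUnitIfIsLegacy
-- ===== SOURCE A (Python) =====
-- from typing import Tuple
--
-- _LEGACY_TO_CURRENT = {
--     ("1000ft3", "Mcf"),
--     ("1000m3", "Mm3"),
--     ("M(ft3)", "MMcf"),
--     ("M(m3)", "MMm3"),
--     ("k(ft3)", "Mcf"),
-- }
--
-- def FixUnitIfIsLegacy(unit: str) -> Tuple[bool, str]:
--     fixed_unit = unit
--     try:
--         for legacy, current in _LEGACY_TO_CURRENT:
--             fixed_unit = fixed_unit.replace(legacy, current)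
--         return (unit != fixed_unit), fixed_unit
--     except:
--         return False, unit
-- ===== SOURCE B (Python) =====
-- _LEGACY_TO_CURRENT_ORDERED = [
--     ("1000ft3", "Mcf"),
--     ("1000m3", "Mm3"),
--     ("M(ft3)", "MMcf"),
--     ("M(m3)", "MMm3"),
--     ("k(ft3)", "Mcf"),
-- ]
--
-- def FixUnitIfIsLegacy(unit):
--     out = []
--     i = 0
--     n = len(unit)
--     while i < n:
--         for legacy, current in _LEGACY_TO_CURRENT_ORDERED:
--             if unit.startswith(legacy, i):
--                 out.append(current)
--                 i += len(legacy)
--                 break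
--         else:
--             out.append(unit[i])
--             i += 1
--     fixed_unit = "".join(out)
--     return (unit != fixed_unit), fixed_unit
-- ===== Notes on version B (the rewrite author's own statement) =====
-- stated objective: alternative
-- what changed: A runs five sequential full-string str.replace passes (one per legacy key, building four intermediate strings); B makes a single left-to-right scan that at each position tries the five legacy keys and emits the replacement or copies the character, which is equivalent because the keys never overlap and no replacement output contains or helps form a key.
import Mathlib
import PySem

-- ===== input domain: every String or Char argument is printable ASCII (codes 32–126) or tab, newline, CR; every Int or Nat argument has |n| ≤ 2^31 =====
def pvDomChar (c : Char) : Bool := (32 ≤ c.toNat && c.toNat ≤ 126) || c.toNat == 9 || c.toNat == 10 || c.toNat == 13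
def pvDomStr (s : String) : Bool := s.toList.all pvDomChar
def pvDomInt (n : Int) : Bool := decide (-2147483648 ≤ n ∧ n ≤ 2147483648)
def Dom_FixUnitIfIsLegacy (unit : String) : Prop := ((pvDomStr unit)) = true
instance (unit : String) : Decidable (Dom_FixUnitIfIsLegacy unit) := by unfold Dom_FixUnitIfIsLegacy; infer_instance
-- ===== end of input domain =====

-- B replaces A's five sequential full-string str.replace passes by one left-to-right scan that
-- tries the five legacy keys at each position (alternative decomposition; same return value).
-- A iterates over a Python set literal; the result is iteration-order independent (keys never
-- overlap and no replacement output contains or helps form a key), so the port fixes the source order.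

-- ===== PORT A =====
def FixUnitIfIsLegacy (unit : String) : Bool × String :=
  -- fixed_unit = unit; then one str.replace per (legacy, current) pair; the bare except is
  -- unreachable for a str argument (str.replace raises nothing), so it is not ported.
  let f1 := PySem.Str.replace unit "1000ft3" "Mcf"
  let f2 := PySem.Str.replace f1 "1000m3" "Mm3"
  let f3 := PySem.Str.replace f2 "M(ft3)" "MMcf"
  let f4 := PySem.Str.replace f3 "M(m3)" "MMm3"
  let f5 := PySem.Str.replace f4 "k(ft3)" "Mcf"
  ((unit != f5), f5)

-- ===== PORT B =====
-- the five (legacy, current) pairs of Source B, as char lists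
def pvK1 : List Char := ['1','0','0','0','f','t','3']
def pvN1 : List Char := ['M','c','f']
def pvK2 : List Char := ['1','0','0','0','m','3']
def pvN2 : List Char := ['M','m','3']
def pvK3 : List Char := ['M','(','f','t','3',')']
def pvN3 : List Char := ['M','M','c','f']
def pvK4 : List Char := ['M','(','m','3',')']
def pvN4 : List Char := ['M','M','m','3']
def pvK5 : List Char := ['k','(','f','t','3',')']
def pvN5 : List Char := ['M','c','f']

-- Source B's while-loop over the current position = recursion on the remaining suffix; the inner
-- for-loop over the five literal pairs (first key matching at the position wins) is unrolled.
def pvScan : List Char → List Char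
  | [] => []
  | c :: t =>
    if pvK1.isPrefixOf (c :: t) then pvN1 ++ pvScan ((c :: t).drop pvK1.length)
    else if pvK2.isPrefixOf (c :: t) then pvN2 ++ pvScan ((c :: t).drop pvK2.length)
    else if pvK3.isPrefixOf (c :: t) then pvN3 ++ pvScan ((c :: t).drop pvK3.length)
    else if pvK4.isPrefixOf (c :: t) then pvN4 ++ pvScan ((c :: t).drop pvK4.length)
    else if pvK5.isPrefixOf (c :: t) then pvN5 ++ pvScan ((c :: t).drop pvK5.length)
    else c :: pvScan t
  termination_by l => l.length
  decreasing_by all_goals (simp [pvK1, pvK2, pvK3, pvK4, pvK5]; try omega)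

def FixUnitIfIsLegacy_alt (unit : String) : Bool × String :=
  let fixed_unit := String.ofList (pvScan unit.toList)   -- "".join(out)
  ((unit != fixed_unit), fixed_unit)

-- ===== PRECONDITION & SPEC =====
def Spec_FixUnitIfIsLegacy (unit : String) (out : Bool × String) : Prop := out = FixUnitIfIsLegacy_alt unit
instance (unit : String) (out : Bool × String) : Decidable (Spec_FixUnitIfIsLegacy unit out) := by unfold Spec_FixUnitIfIsLegacy; infer_instance

-- ===== CLAIM (what is proved, stated in full; the proofs are below) =====
def Claim_equal_FixUnitIfIsLegacy : Prop := ∀ (unit : String), Dom_FixUnitIfIsLegacy unit → Spec_FixUnitIfIsLegacy unit (FixUnitIfIsLegacy unit)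

-- ===== LEMMAS AND PROOFS =====

-- single-key replacement as structural recursion on the suffix (proof-side model of Chars.replace)
def pvRep (old new : List Char) : List Char → List Char
  | [] => []
  | c :: t =>
    if old.isPrefixOf (c :: t) ∧ old ≠ [] then new ++ pvRep old new ((c :: t).drop old.length)
    else c :: pvRep old new t
  termination_by l => l.length
  decreasing_by
  · rename_i h; have h1 : 0 < old.length := List.length_pos_of_ne_nil h.2
    simp; omega
  · simp

theorem pvRep_nil (old new : List Char) : pvRep old new [] = [] := by rw [pvRep]

theorem pvRep_cons (old new : List Char) (c : Char) (t : List Char) :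
    pvRep old new (c :: t) =
      if old.isPrefixOf (c :: t) ∧ old ≠ [] then new ++ pvRep old new ((c :: t).drop old.length)
      else c :: pvRep old new t := by rw [pvRep]

theorem pvScan_nil : pvScan [] = [] := by rw [pvScan]

theorem pvScan_cons (c : Char) (t : List Char) :
    pvScan (c :: t) =
      if pvK1.isPrefixOf (c :: t) then pvN1 ++ pvScan ((c :: t).drop pvK1.length)
      else if pvK2.isPrefixOf (c :: t) then pvN2 ++ pvScan ((c :: t).drop pvK2.length)
      else if pvK3.isPrefixOf (c :: t) then pvN3 ++ pvScan ((c :: t).drop pvK3.length)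
      else if pvK4.isPrefixOf (c :: t) then pvN4 ++ pvScan ((c :: t).drop pvK4.length)
      else if pvK5.isPrefixOf (c :: t) then pvN5 ++ pvScan ((c :: t).drop pvK5.length)
      else c :: pvScan t := by rw [pvScan]

theorem pvGoEq (old new : List Char) (h : old ≠ []) :
    ∀ f s acc, s.length ≤ f →
      PySem.Chars.replace.go old new f s acc = acc.reverse ++ pvRep old new s := by
  intro f
  induction f with
  | zero =>
    intro s acc hs
    have : s = [] := by cases s <;> simp_all
    subst this
    simp [PySem.Chars.replace.go, pvRep_nil]
  | succ f ih =>
    intro s acc hs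
    cases s with
    | nil => simp [PySem.Chars.replace.go, pvRep_nil]
    | cons c t =>
      by_cases hp : old.isPrefixOf (c :: t)
      · rw [show PySem.Chars.replace.go old new (f+1) (c :: t) acc
            = PySem.Chars.replace.go old new f ((c :: t).drop old.length) (new.reverse ++ acc) by
          simp [PySem.Chars.replace.go, hp]]
        have h1 : 0 < old.length := List.length_pos_of_ne_nil h
        rw [ih _ _ (by simp at hs ⊢; omega)]
        rw [pvRep_cons, if_pos ⟨hp, h⟩]
        simp
      · rw [show PySem.Chars.replace.go old new (f+1) (c :: t) acc
            = PySem.Chars.replace.go old new f t (c :: acc) by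
          simp [PySem.Chars.replace.go, hp]]
        rw [ih _ _ (by simpa using Nat.le_of_succ_le_succ hs)]
        rw [pvRep_cons, if_neg (by simp [hp])]
        simp

theorem pvReplaceEq (old new s : List Char) (h : old ≠ []) :
    PySem.Chars.replace s old new = pvRep old new s := by
  rw [PySem.Chars.replace]
  rw [if_neg (by simpa using h)]
  simpa using pvGoEq old new h s.length s [] le_rfl

theorem pvNotPrefAppend (old r x : List Char) (h1 : ¬ old <+: r) (h2 : ¬ r <+: old) :
    ¬ old <+: r ++ x := by
  intro h
  rcases List.prefix_or_prefix_of_prefix h (List.prefix_append r x) with h' | h'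
  · exact h1 h'
  · exact h2 h'

theorem pvCons (old new : List Char) (c : Char) (t : List Char) (h : ¬ old <+: c :: t) :
    pvRep old new (c :: t) = c :: pvRep old new t := by
  rw [pvRep_cons, if_neg (by rw [List.isPrefixOf_iff_prefix]; tauto)]

theorem pvMatch (old new x : List Char) (h : old ≠ []) :
    pvRep old new (old ++ x) = new ++ pvRep old new x := by
  cases ho : old with
  | nil => exact absurd ho h
  | cons o ot =>
    rw [← ho, show old ++ x = o :: (ot ++ x) by rw [ho]; simp]
    rw [pvRep_cons, if_pos ⟨by rw [List.isPrefixOf_iff_prefix, ho]; exact ⟨x, by simp⟩, h⟩]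
    congr 1
    rw [show o :: (ot ++ x) = old ++ x by rw [ho]; simp]
    simp

theorem pvPass (old new : List Char) (_hold : old ≠ [])
    (p : List Char)
    (h : ∀ m, m < p.length → ¬ old <+: p.drop m ∧ ¬ p.drop m <+: old) :
    ∀ x, pvRep old new (p ++ x) = p ++ pvRep old new x := by
  induction p with
  | nil => simp
  | cons c p' ih =>
    intro x
    have h0 := h 0 (by simp)
    simp only [List.drop_zero] at h0
    rw [List.cons_append, pvCons old new c (p' ++ x)
      (pvNotPrefAppend old (c :: p') x h0.1 h0.2)]
    rw [ih (fun m hm => by simpa using h (m+1) (by simpa using hm)) x]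
    simp

-- the replacement text starts with d; if d does not occur in ks, a prefix ks of the output
-- was already a prefix of the input
theorem pvNoNew (old new : List Char) (_hold : old ≠ []) (d : Char) (nt : List Char)
    (hnew : new = d :: nt) :
    ∀ n s ks, s.length ≤ n → d ∉ ks → ks <+: pvRep old new s → ks <+: s := by
  intro n
  induction n with
  | zero =>
    intro s ks hs hd hp
    have : s = [] := by cases s <;> simp_all
    subst this
    simpa [pvRep_nil] using hp
  | succ n ih =>
    intro s ks hs hd hp
    cases s with
    | nil => simpa [pvRep_nil] using hp
    | cons c t =>
      by_cases hm : old.isPrefixOf (c :: t) ∧ old ≠ []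
      · rw [pvRep_cons, if_pos hm, hnew] at hp
        cases ks with
        | nil => exact List.nil_prefix
        | cons k0 ks' =>
          rw [List.cons_append, List.cons_prefix_cons] at hp
          exact absurd (hp.1 ▸ List.mem_cons_self) hd
      · rw [pvRep_cons, if_neg hm] at hp
        cases ks with
        | nil => exact List.nil_prefix
        | cons k0 ks' =>
          rw [List.cons_prefix_cons] at hp
          rw [List.cons_prefix_cons]
          exact ⟨hp.1, ih t ks' (by simpa using Nat.le_of_succ_le_succ hs)
            (fun hh => hd (List.mem_cons_of_mem _ hh)) hp.2⟩

-- A's chain of five single-key replacements, on char lists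
def pvChain (l : List Char) : List Char :=
  pvRep pvK5 pvN5 (pvRep pvK4 pvN4 (pvRep pvK3 pvN3 (pvRep pvK2 pvN2 (pvRep pvK1 pvN1 l))))

theorem pvChainEq : ∀ n l, l.length ≤ n → pvChain l = pvScan l := by
  intro n
  induction n with
  | zero =>
    intro l hl
    have : l = [] := by cases l <;> simp_all
    subst this
    simp [pvChain, pvRep_nil, pvScan_nil]
  | succ n ih =>
    intro l hl
    cases l with
    | nil => simp [pvChain, pvRep_nil, pvScan_nil]
    | cons c t =>
      by_cases h1 : pvK1 <+: c :: t
      · obtain ⟨t', ht'⟩ := h1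
        rw [← ht']
        have hlen : t'.length ≤ n := by
          have := congrArg List.length ht'
          simp [pvK1] at this hl ⊢; omega
        rw [pvChain, pvMatch pvK1 pvN1 t' (by decide)]
        rw [pvPass pvK2 pvN2 (by decide) pvN1 (by decide)]
        rw [pvPass pvK3 pvN3 (by decide) pvN1 (by decide)]
        rw [pvPass pvK4 pvN4 (by decide) pvN1 (by decide)]
        rw [pvPass pvK5 pvN5 (by decide) pvN1 (by decide)]
        rw [show pvK1 ++ t' = '1' :: (['0','0','0','f','t','3'] ++ t') by simp [pvK1]]
        rw [pvScan_cons,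
          if_pos (by rw [List.isPrefixOf_iff_prefix]; exact ⟨t', by simp [pvK1]⟩)]
        rw [show (('1' :: (['0','0','0','f','t','3'] ++ t')).drop pvK1.length) = t' by simp [pvK1]]
        rw [show pvRep pvK5 pvN5 (pvRep pvK4 pvN4 (pvRep pvK3 pvN3 (pvRep pvK2 pvN2 (pvRep pvK1 pvN1 t')))) = pvChain t' from rfl]
        rw [ih t' hlen]
      · by_cases h2 : pvK2 <+: c :: t
        · obtain ⟨t', ht'⟩ := h2
          rw [← ht']
          have hlen : t'.length ≤ n := by
            have := congrArg List.length ht'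
            simp [pvK2] at this hl ⊢; omega
          rw [pvChain]
          rw [pvPass pvK1 pvN1 (by decide) pvK2 (by decide)]
          rw [pvMatch pvK2 pvN2 _ (by decide)]
          rw [pvPass pvK3 pvN3 (by decide) pvN2 (by decide)]
          rw [pvPass pvK4 pvN4 (by decide) pvN2 (by decide)]
          rw [pvPass pvK5 pvN5 (by decide) pvN2 (by decide)]
          rw [show pvK2 ++ t' = '1' :: (['0','0','0','m','3'] ++ t') by simp [pvK2]]
          rw [pvScan_cons,
            if_neg (by rw [List.isPrefixOf_iff_prefix]
                       exact pvNotPrefAppend pvK1 ['1','0','0','0','m','3'] t' (by decide) (by decide)),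
            if_pos (by rw [List.isPrefixOf_iff_prefix]; exact ⟨t', by simp [pvK2]⟩)]
          rw [show (('1' :: (['0','0','0','m','3'] ++ t')).drop pvK2.length) = t' by simp [pvK2]]
          rw [show pvRep pvK5 pvN5 (pvRep pvK4 pvN4 (pvRep pvK3 pvN3 (pvRep pvK2 pvN2 (pvRep pvK1 pvN1 t')))) = pvChain t' from rfl]
          rw [ih t' hlen]
        · by_cases h3 : pvK3 <+: c :: t
          · obtain ⟨t', ht'⟩ := h3
            rw [← ht']
            have hlen : t'.length ≤ n := by
              have := congrArg List.length ht'
              simp [pvK3] at this hl ⊢; omega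
            rw [pvChain]
            rw [pvPass pvK1 pvN1 (by decide) pvK3 (by decide)]
            rw [pvPass pvK2 pvN2 (by decide) pvK3 (by decide)]
            rw [pvMatch pvK3 pvN3 _ (by decide)]
            rw [pvPass pvK4 pvN4 (by decide) pvN3 (by decide)]
            rw [pvPass pvK5 pvN5 (by decide) pvN3 (by decide)]
            rw [show pvK3 ++ t' = 'M' :: (['(','f','t','3',')'] ++ t') by simp [pvK3]]
            rw [pvScan_cons,
              if_neg (by rw [List.isPrefixOf_iff_prefix]
                         exact pvNotPrefAppend pvK1 ['M','(','f','t','3',')'] t' (by decide) (by decide)),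
              if_neg (by rw [List.isPrefixOf_iff_prefix]
                         exact pvNotPrefAppend pvK2 ['M','(','f','t','3',')'] t' (by decide) (by decide)),
              if_pos (by rw [List.isPrefixOf_iff_prefix]; exact ⟨t', by simp [pvK3]⟩)]
            rw [show (('M' :: (['(','f','t','3',')'] ++ t')).drop pvK3.length) = t' by simp [pvK3]]
            rw [show pvRep pvK5 pvN5 (pvRep pvK4 pvN4 (pvRep pvK3 pvN3 (pvRep pvK2 pvN2 (pvRep pvK1 pvN1 t')))) = pvChain t' from rfl]
            rw [ih t' hlen]
          · by_cases h4 : pvK4 <+: c :: t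
            · obtain ⟨t', ht'⟩ := h4
              rw [← ht']
              have hlen : t'.length ≤ n := by
                have := congrArg List.length ht'
                simp [pvK4] at this hl ⊢; omega
              rw [pvChain]
              rw [pvPass pvK1 pvN1 (by decide) pvK4 (by decide)]
              rw [pvPass pvK2 pvN2 (by decide) pvK4 (by decide)]
              rw [pvPass pvK3 pvN3 (by decide) pvK4 (by decide)]
              rw [pvMatch pvK4 pvN4 _ (by decide)]
              rw [pvPass pvK5 pvN5 (by decide) pvN4 (by decide)]
              rw [show pvK4 ++ t' = 'M' :: (['(','m','3',')'] ++ t') by simp [pvK4]]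
              rw [pvScan_cons,
                if_neg (by rw [List.isPrefixOf_iff_prefix]
                           exact pvNotPrefAppend pvK1 ['M','(','m','3',')'] t' (by decide) (by decide)),
                if_neg (by rw [List.isPrefixOf_iff_prefix]
                           exact pvNotPrefAppend pvK2 ['M','(','m','3',')'] t' (by decide) (by decide)),
                if_neg (by rw [List.isPrefixOf_iff_prefix]
                           exact pvNotPrefAppend pvK3 ['M','(','m','3',')'] t' (by decide) (by decide)),
                if_pos (by rw [List.isPrefixOf_iff_prefix]; exact ⟨t', by simp [pvK4]⟩)]
              rw [show (('M' :: (['(','m','3',')'] ++ t')).drop pvK4.length) = t' by simp [pvK4]]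
              rw [show pvRep pvK5 pvN5 (pvRep pvK4 pvN4 (pvRep pvK3 pvN3 (pvRep pvK2 pvN2 (pvRep pvK1 pvN1 t')))) = pvChain t' from rfl]
              rw [ih t' hlen]
            · by_cases h5 : pvK5 <+: c :: t
              · obtain ⟨t', ht'⟩ := h5
                rw [← ht']
                have hlen : t'.length ≤ n := by
                  have := congrArg List.length ht'
                  simp [pvK5] at this hl ⊢; omega
                rw [pvChain]
                rw [pvPass pvK1 pvN1 (by decide) pvK5 (by decide)]
                rw [pvPass pvK2 pvN2 (by decide) pvK5 (by decide)]
                rw [pvPass pvK3 pvN3 (by decide) pvK5 (by decide)]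
                rw [pvPass pvK4 pvN4 (by decide) pvK5 (by decide)]
                rw [pvMatch pvK5 pvN5 _ (by decide)]
                rw [show pvK5 ++ t' = 'k' :: (['(','f','t','3',')'] ++ t') by simp [pvK5]]
                rw [pvScan_cons,
                  if_neg (by rw [List.isPrefixOf_iff_prefix]
                             exact pvNotPrefAppend pvK1 ['k','(','f','t','3',')'] t' (by decide) (by decide)),
                  if_neg (by rw [List.isPrefixOf_iff_prefix]
                             exact pvNotPrefAppend pvK2 ['k','(','f','t','3',')'] t' (by decide) (by decide)),
                  if_neg (by rw [List.isPrefixOf_iff_prefix]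
                             exact pvNotPrefAppend pvK3 ['k','(','f','t','3',')'] t' (by decide) (by decide)),
                  if_neg (by rw [List.isPrefixOf_iff_prefix]
                             exact pvNotPrefAppend pvK4 ['k','(','f','t','3',')'] t' (by decide) (by decide)),
                  if_pos (by rw [List.isPrefixOf_iff_prefix]; exact ⟨t', by simp [pvK5]⟩)]
                rw [show (('k' :: (['(','f','t','3',')'] ++ t')).drop pvK5.length) = t' by simp [pvK5]]
                rw [show pvRep pvK5 pvN5 (pvRep pvK4 pvN4 (pvRep pvK3 pvN3 (pvRep pvK2 pvN2 (pvRep pvK1 pvN1 t')))) = pvChain t' from rfl]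
                rw [ih t' hlen]
              · -- no key matches at this position: every pass copies the head character
                have hlen : t.length ≤ n := by simpa using Nat.le_of_succ_le_succ hl
                rw [pvChain, pvCons pvK1 pvN1 c t h1]
                have g2 : ¬ pvK2 <+: c :: pvRep pvK1 pvN1 t := by
                  intro hp
                  rw [show pvK2 = '1' :: ['0','0','0','m','3'] from rfl, List.cons_prefix_cons] at hp
                  have := pvNoNew pvK1 pvN1 (by decide) 'M' ['c','f'] rfl t.length t _ le_rfl (by decide) hp.2
                  exact h2 (by rw [show pvK2 = '1' :: ['0','0','0','m','3'] from rfl, List.cons_prefix_cons]; exact ⟨hp.1, this⟩)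
                rw [pvCons pvK2 pvN2 c _ g2]
                have g3 : ¬ pvK3 <+: c :: pvRep pvK2 pvN2 (pvRep pvK1 pvN1 t) := by
                  intro hp
                  rw [show pvK3 = 'M' :: ['(','f','t','3',')'] from rfl, List.cons_prefix_cons] at hp
                  have s2 := pvNoNew pvK2 pvN2 (by decide) 'M' ['m','3'] rfl _ _ _ le_rfl (by decide) hp.2
                  have s1 := pvNoNew pvK1 pvN1 (by decide) 'M' ['c','f'] rfl t.length t _ le_rfl (by decide) s2
                  exact h3 (by rw [show pvK3 = 'M' :: ['(','f','t','3',')'] from rfl, List.cons_prefix_cons]; exact ⟨hp.1, s1⟩)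
                rw [pvCons pvK3 pvN3 c _ g3]
                have g4 : ¬ pvK4 <+: c :: pvRep pvK3 pvN3 (pvRep pvK2 pvN2 (pvRep pvK1 pvN1 t)) := by
                  intro hp
                  rw [show pvK4 = 'M' :: ['(','m','3',')'] from rfl, List.cons_prefix_cons] at hp
                  have s3 := pvNoNew pvK3 pvN3 (by decide) 'M' ['M','c','f'] rfl _ _ _ le_rfl (by decide) hp.2
                  have s2 := pvNoNew pvK2 pvN2 (by decide) 'M' ['m','3'] rfl _ _ _ le_rfl (by decide) s3
                  have s1 := pvNoNew pvK1 pvN1 (by decide) 'M' ['c','f'] rfl t.length t _ le_rfl (by decide) s2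
                  exact h4 (by rw [show pvK4 = 'M' :: ['(','m','3',')'] from rfl, List.cons_prefix_cons]; exact ⟨hp.1, s1⟩)
                rw [pvCons pvK4 pvN4 c _ g4]
                have g5 : ¬ pvK5 <+: c :: pvRep pvK4 pvN4 (pvRep pvK3 pvN3 (pvRep pvK2 pvN2 (pvRep pvK1 pvN1 t))) := by
                  intro hp
                  rw [show pvK5 = 'k' :: ['(','f','t','3',')'] from rfl, List.cons_prefix_cons] at hp
                  have s4 := pvNoNew pvK4 pvN4 (by decide) 'M' ['M','m','3'] rfl _ _ _ le_rfl (by decide) hp.2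
                  have s3 := pvNoNew pvK3 pvN3 (by decide) 'M' ['M','c','f'] rfl _ _ _ le_rfl (by decide) s4
                  have s2 := pvNoNew pvK2 pvN2 (by decide) 'M' ['m','3'] rfl _ _ _ le_rfl (by decide) s3
                  have s1 := pvNoNew pvK1 pvN1 (by decide) 'M' ['c','f'] rfl t.length t _ le_rfl (by decide) s2
                  exact h5 (by rw [show pvK5 = 'k' :: ['(','f','t','3',')'] from rfl, List.cons_prefix_cons]; exact ⟨hp.1, s1⟩)
                rw [pvCons pvK5 pvN5 c _ g5]
                rw [show pvRep pvK5 pvN5 (pvRep pvK4 pvN4 (pvRep pvK3 pvN3 (pvRep pvK2 pvN2 (pvRep pvK1 pvN1 t)))) = pvChain t from rfl]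
                rw [ih t hlen]
                rw [pvScan_cons,
                  if_neg (by rw [List.isPrefixOf_iff_prefix]; exact h1),
                  if_neg (by rw [List.isPrefixOf_iff_prefix]; exact h2),
                  if_neg (by rw [List.isPrefixOf_iff_prefix]; exact h3),
                  if_neg (by rw [List.isPrefixOf_iff_prefix]; exact h4),
                  if_neg (by rw [List.isPrefixOf_iff_prefix]; exact h5)]

-- ===== VERDICT (by name: the statement is the Claim_ definition above) =====
theorem FixUnitIfIsLegacy_spec : Claim_equal_FixUnitIfIsLegacy := by
  intro unit _
  unfold Spec_FixUnitIfIsLegacy FixUnitIfIsLegacy FixUnitIfIsLegacy_alt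
  simp only [PySem.Str.replace, String.toList_ofList]
  rw [show ("1000ft3" : String).toList = pvK1 by decide,
      show ("Mcf" : String).toList = pvN1 by decide,
      show ("1000m3" : String).toList = pvK2 by decide,
      show ("Mm3" : String).toList = pvN2 by decide,
      show ("M(ft3)" : String).toList = pvK3 by decide,
      show ("MMcf" : String).toList = pvN3 by decide,
      show ("M(m3)" : String).toList = pvK4 by decide,
      show ("MMm3" : String).toList = pvN4 by decide,
      show ("k(ft3)" : String).toList = pvK5 by decide]
  rw [pvReplaceEq pvK1 pvN1 _ (by decide),
      pvReplaceEq pvK2 pvN2 _ (by decide),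
      pvReplaceEq pvK3 pvN3 _ (by decide),
      pvReplaceEq pvK4 pvN4 _ (by decide),
      pvReplaceEq pvK5 pvN1 _ (by decide)]
  rw [show pvRep pvK5 pvN1 (pvRep pvK4 pvN4 (pvRep pvK3 pvN3 (pvRep pvK2 pvN2 (pvRep pvK1 pvN1 unit.toList)))) = pvChain unit.toList from rfl]
  rw [pvChainEq unit.toList.length unit.toList le_rfl]
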